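-- pv_equiv track=rewrite | github.com/pajarrako/Guia-ejercicios-1 | guia ejercicios/ejercicio 4.py | productoBooleanos
-- ===== SOURCE A (Python) =====
-- def productoBooleanos(a):
--   aP=0
--   aIP=0
--   for i in range(len(a)):
--     if i % 2 == 0 and a[i] == True:
--       aP+=1
--     elif i % 2 ==1 and a[i] == False:
--       aIP +=1
--   return aP * aIP
-- ===== SOURCE B (Python) =====
-- def productoBooleanos(a):
--   e = 0
--   o = 0
--   it = iter(a)
--   for x in it:
--     if x == True:
--       e += 1
--     y = next(it, None)
--     if y is not None and y == False:
--       o += 1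
--   return e * o
-- ===== Notes on version B (the rewrite author's own statement) =====
-- stated objective: alternative
-- what changed: Replaces the indexed loop with runtime i%2 tests by a structural two-at-a-time recursion that consumes a pair of elements per step, so parity is encoded in the recursion shape and no index arithmetic is needed.
import Mathlib
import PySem

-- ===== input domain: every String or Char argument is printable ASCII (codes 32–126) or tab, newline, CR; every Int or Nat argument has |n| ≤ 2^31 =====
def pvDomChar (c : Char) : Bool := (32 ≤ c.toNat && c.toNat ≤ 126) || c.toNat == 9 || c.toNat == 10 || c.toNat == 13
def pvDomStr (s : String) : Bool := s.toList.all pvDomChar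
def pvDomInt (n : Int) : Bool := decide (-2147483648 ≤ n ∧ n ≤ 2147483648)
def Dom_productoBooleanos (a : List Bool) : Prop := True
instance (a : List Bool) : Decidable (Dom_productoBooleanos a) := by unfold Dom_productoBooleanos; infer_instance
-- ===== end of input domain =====

-- B replaces A's indexed loop with i%2 tests by an index-free pairwise pass (two elements per step); alternative decomposition, same cost.

-- ===== PORT A =====
def productoBooleanos (a : List Bool) : Int :=
  let s := (PySem.List.pyRange 0 (a.length : Int) 1).foldl
    (fun (st : Int × Int) i =>
      if PySem.Int.mod i 2 = 0 ∧ PySem.List.pyGetD a i false = true then (st.1 + 1, st.2)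
      else if PySem.Int.mod i 2 = 1 ∧ PySem.List.pyGetD a i false = false then (st.1, st.2 + 1)
      else st)
    (0, 0)
  s.1 * s.2

-- ===== PORT B =====
-- the pairwise loop over the iterator: one even-position element x, then (if present) its odd-position partner y
def pvPairLoop (e o : Int) : List Bool → Int × Int
  | [] => (e, o)
  | [x] => ((if x = true then e + 1 else e), o)
  | x :: y :: rest =>
      pvPairLoop (if x = true then e + 1 else e) (if y = false then o + 1 else o) rest

def productoBooleanos_alt (a : List Bool) : Int :=
  let s := pvPairLoop 0 0 a
  s.1 * s.2

-- ===== PRECONDITION & SPEC =====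
def Spec_productoBooleanos (a : List Bool) (out : Int) : Prop := out = productoBooleanos_alt a
instance (a : List Bool) (out : Int) : Decidable (Spec_productoBooleanos a out) := by unfold Spec_productoBooleanos; infer_instance

-- ===== CLAIM (what is proved, stated in full; the proofs are below) =====
def Claim_equal_productoBooleanos : Prop := ∀ (a : List Bool), Dom_productoBooleanos a → Spec_productoBooleanos a (productoBooleanos a)

-- ===== LEMMAS AND PROOFS =====

-- appending one element to the list bumps the appropriate counter according to the parity of a.length
theorem pvPairLoop_concat : ∀ (a : List Bool) (e o : Int) (x : Bool),
    pvPairLoop e o (a ++ [x]) =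
      if a.length % 2 = 0 then ((pvPairLoop e o a).1 + (if x = true then 1 else 0), (pvPairLoop e o a).2)
      else ((pvPairLoop e o a).1, (pvPairLoop e o a).2 + (if x = false then 1 else 0))
  | [], e, o, x => by simp [pvPairLoop]; split_ifs <;> simp
  | [y], e, o, x => by simp [pvPairLoop]; split_ifs <;> simp
  | y :: z :: rest, e, o, x => by
      simp only [List.cons_append, pvPairLoop, pvPairLoop_concat rest, List.length_cons]
      have h2 : (rest.length + 1 + 1) % 2 = rest.length % 2 := by omega
      rw [h2]

-- A's fold computes exactly the pairwise pass
theorem pvFold_eq_pairLoop (a : List Bool) :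
    (PySem.List.pyRange 0 (a.length : Int) 1).foldl
      (fun (st : Int × Int) i =>
        if PySem.Int.mod i 2 = 0 ∧ PySem.List.pyGetD a i false = true then (st.1 + 1, st.2)
        else if PySem.Int.mod i 2 = 1 ∧ PySem.List.pyGetD a i false = false then (st.1, st.2 + 1)
        else st)
      (0, 0) = pvPairLoop 0 0 a := by
  induction a using List.reverseRecOn with
  | nil => simp [pvPairLoop, PySem.List.pyRange_one_eq_nil]
  | append_singleton b x ih =>
      have hlen : ((b ++ [x]).length : Int) = (b.length : Int) + 1 := by
        simp [List.length_append]
      rw [hlen, PySem.List.pyRange_one_succ_right (by positivity), List.foldl_append]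
      have hcongr : (PySem.List.pyRange 0 (b.length : Int) 1).foldl
          (fun (st : Int × Int) i =>
            if PySem.Int.mod i 2 = 0 ∧ PySem.List.pyGetD (b ++ [x]) i false = true then (st.1 + 1, st.2)
            else if PySem.Int.mod i 2 = 1 ∧ PySem.List.pyGetD (b ++ [x]) i false = false then (st.1, st.2 + 1)
            else st)
          (0, 0) = pvPairLoop 0 0 b := by
        rw [← ih]
        apply PySem.List.foldl_congr_mem
        intro acc i hi
        have hm := (PySem.List.mem_pyRange_one).mp hi
        have hget : PySem.List.pyGetD (b ++ [x]) i false = PySem.List.pyGetD b i false := by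
          rw [PySem.List.pyGetD_of_nonneg _ _ hm.1, PySem.List.pyGetD_of_nonneg _ _ hm.1]
          have hlt : i.toNat < b.length := by omega
          simp [List.getD, List.getElem?_append_left hlt]
        rw [hget]
      rw [hcongr]
      -- the last step: index b.length, element x
      have hgetx : PySem.List.pyGetD (b ++ [x]) (b.length : Int) false = x := by
        rw [PySem.List.pyGetD_natCast]
        simp [List.getD]
      have hmod : PySem.Int.mod (b.length : Int) 2 = ((b.length % 2 : Nat) : Int) := by
        simp [PySem.Int.mod, Int.fmod_eq_emod]
      rw [pvPairLoop_concat]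
      simp only [List.foldl_cons, List.foldl_nil]
      rw [hmod, hgetx]
      by_cases hpar : b.length % 2 = 0
      · simp only [hpar]
        cases x <;> norm_num
      · have hpar1 : b.length % 2 = 1 := by omega
        simp only [hpar1]
        cases x <;> norm_num

-- ===== VERDICT (by name: the statement is the Claim_ definition above) =====
theorem productoBooleanos_spec : Claim_equal_productoBooleanos := by
  intro a _
  unfold Spec_productoBooleanos productoBooleanos productoBooleanos_alt
  simp only [pvFold_eq_pairLoop]
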